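-- pv_equiv track=rewrite | github.com/gokulnath118/TM_Learning | Coding/18-03-2025/program1.py | homeless
-- ===== SOURCE A (Python) =====
-- def homeless(people,houses):
--     n=len(people)
--     c=0
--     for i in range(n):
--         for j in range(n):
--             if people[i]<=houses[j]:
--                 houses[j]=0
--                 c+=1
--                 break
--     ans=n-c
--     return ans
-- ===== SOURCE B (Python) =====
-- # Segment-tree first-fit: leftmost house with capacity >= person in O(log n) per person.
-- # Note: A mutates `houses` in place; B does not (equivalence is about the return value).
-- def _build(hs):
--     if len(hs) == 1:
--         return ('leaf', hs[0])
--     m = len(hs) // 2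
--     l = _build(hs[:m])
--     r = _build(hs[m:])
--     return ('node', m, max(_top(l), _top(r)), l, r)
--
-- def _top(t):
--     return t[1] if t[0] == 'leaf' else t[2]
--
-- def _query(t, p):
--     if t[0] == 'leaf':
--         return 0 if p <= t[1] else None
--     _, ls, mx, l, r = t
--     if mx < p:
--         return None
--     j = _query(l, p)
--     if j is not None:
--         return j
--     j = _query(r, p)
--     return None if j is None else ls + j
--
-- def _update(t, j):
--     if t[0] == 'leaf':
--         return ('leaf', 0)
--     _, ls, _, l, r = t
--     if j < ls:
--         l = _update(l, j)
--     else: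
--         r = _update(r, j - ls)
--     return ('node', ls, max(_top(l), _top(r)), l, r)
--
-- def homeless(people, houses):
--     n = len(people)
--     hs = houses[:n]
--     if not hs:
--         return n
--     t = _build(hs)
--     c = 0
--     for p in people:
--         j = _query(t, p)
--         if j is not None:
--             t = _update(t, j)
--             c += 1
--     return n - c
-- ===== Notes on version B (the rewrite author's own statement) =====
-- stated objective: faster
-- what changed: Replaces A's quadratic inner linear scan over houses by a max segment tree: each person finds the leftmost house with capacity >= person in O(log n) and that house is point-updated to 0 (A also mutates houses in place; B does not).
-- outside the precondition, e.g. on homeless([5], []): A raises IndexError, B returns 1; on homeless([0, 0, 0], [5]): A returns 0, B returns 0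
import Mathlib
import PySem

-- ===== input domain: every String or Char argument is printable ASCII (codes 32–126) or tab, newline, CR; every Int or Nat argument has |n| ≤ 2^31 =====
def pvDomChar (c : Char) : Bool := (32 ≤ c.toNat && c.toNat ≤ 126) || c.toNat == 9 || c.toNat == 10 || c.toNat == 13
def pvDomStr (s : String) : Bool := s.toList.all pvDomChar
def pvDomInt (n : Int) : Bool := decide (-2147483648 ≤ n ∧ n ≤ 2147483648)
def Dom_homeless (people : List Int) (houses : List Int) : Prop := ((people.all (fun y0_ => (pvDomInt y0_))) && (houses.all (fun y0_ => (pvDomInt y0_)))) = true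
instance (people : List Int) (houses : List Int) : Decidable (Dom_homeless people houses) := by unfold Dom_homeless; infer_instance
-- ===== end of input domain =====

-- B replaces A's quadratic first-fit inner scan by a max segment tree (leftmost house with
-- capacity ≥ person, then point-update to 0); faster in a timing run. A mutates `houses`
-- in place, B does not: the equivalence proved here is about the return value only.

-- ===== PORT A =====
-- inner 'for j in range(n): if people[i] <= houses[j]: ... break' ; outer value: some none = no break,
-- some (some j) = break at j, none = IndexError (excluded by Pre_)
def innerA (houses : List Int) (p : Int) : List Int → Option (Option Int)
  | [] => some none
  | j :: js =>
    match PySem.List.pyGet? houses j with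
    | none => none
    | some h => if p ≤ h then some (some j) else innerA houses p js

-- 'for i in range(n)' with state (houses, c); none = IndexError propagated
def loopA (people : List Int) : List Int → List Int × Int → Option (List Int × Int)
  | [], st => some st
  | i :: is, (houses, c) =>
    match PySem.List.pyGet? people i with
    | none => none
    | some p =>
      match innerA houses p (PySem.List.pyRange 0 people.length 1) with
      | none => none
      | some none => loopA people is (houses, c)
      | some (some j) => loopA people is (PySem.List.pySetD houses j 0, c + 1)

def homeless (people : List Int) (houses : List Int) : Int :=
  match loopA people (PySem.List.pyRange 0 people.length 1) (houses, 0) with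
  | some (_, c) => (people.length : Int) - c
  | none => 0   -- unreachable under Pre_ (Python raises IndexError here)

-- ===== PORT B =====
inductive SegT where
  | leaf : Int → SegT
  | node : Nat → Int → SegT → SegT → SegT
deriving DecidableEq, Repr

def segTop : SegT → Int
  | .leaf v => v
  | .node _ mx _ _ => mx

def segBuild : List Int → SegT
  | [] => .leaf 0   -- never reached: Source B only builds over a non-empty list
  | [x] => .leaf x
  | x :: y :: rest =>
    let m := (x :: y :: rest).length / 2
    let l := segBuild ((x :: y :: rest).take m)
    let r := segBuild ((x :: y :: rest).drop m)
    .node m (max (segTop l) (segTop r)) l r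
termination_by hs => hs.length
decreasing_by
  · simp [List.length_take]; omega
  · simp; omega

def segQuery : SegT → Int → Option Nat
  | .leaf v, p => if p ≤ v then some 0 else none
  | .node ls mx l r, p =>
    if mx < p then none
    else
      match segQuery l p with
      | some j => some j
      | none =>
        match segQuery r p with
        | some j => some (ls + j)
        | none => none

def segUpdate : SegT → Nat → SegT
  | .leaf _, _ => .leaf 0
  | .node ls _ l r, j =>
    if j < ls then
      let l' := segUpdate l j
      .node ls (max (segTop l') (segTop r)) l' r
    else
      let r' := segUpdate r (j - ls)
      .node ls (max (segTop l) (segTop r')) l r'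

def homeless_alt (people : List Int) (houses : List Int) : Int :=
  let n := people.length
  let hs := PySem.List.slice houses none (some (n : Int))
  if hs = [] then (n : Int)
  else
    let st := people.foldl
      (fun (st : SegT × Int) p =>
        match segQuery st.1 p with
        | some j => (segUpdate st.1 j, st.2 + 1)
        | none => st)
      (segBuild hs, 0)
    (n : Int) - st.2

-- ===== PRECONDITION & SPEC =====
-- Pre_ excludes inputs with fewer houses than people: there A's inner loop indexes houses
-- past its end and (except for rare inputs whose people all re-match zeroed houses) raises
-- IndexError; B returns the natural count there.
def Pre_homeless (people : List Int) (houses : List Int) : Prop :=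
  people.length ≤ houses.length
instance (people : List Int) (houses : List Int) : Decidable (Pre_homeless people houses) := by unfold Pre_homeless; infer_instance

def pvWitness_homeless : List Int × List Int := ([3, 1, 7], [2, 5, 4])

def Spec_homeless (people : List Int) (houses : List Int) (out : Int) : Prop := out = homeless_alt people houses
instance (people : List Int) (houses : List Int) (out : Int) : Decidable (Spec_homeless people houses out) := by unfold Spec_homeless; infer_instance

-- ===== CLAIM (what is proved, stated in full; the proofs are below) =====
def Claim_equal_homeless : Prop := ∀ (people : List Int) (houses : List Int), Dom_homeless people houses → Pre_homeless people houses → Spec_homeless people houses (homeless people houses)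

-- ===== LEMMAS AND PROOFS =====

-- reference semantics both ports are reduced to: first-fit over the first n houses
def firstIdx (hs : List Int) (p : Int) : Option Nat :=
  match hs with
  | [] => none
  | h :: t => if p ≤ h then some 0 else (firstIdx t p).map (· + 1)

def goRef : List Int → List Int → Int
  | [], _ => 0
  | p :: ps, hs =>
    match firstIdx hs p with
    | none => goRef ps hs
    | some j => 1 + goRef ps (hs.set j 0)

theorem firstIdx_lt {hs : List Int} {p : Int} {j : Nat} (h : firstIdx hs p = some j) :
    j < hs.length := by
  induction hs generalizing j with
  | nil => simp [firstIdx] at h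
  | cons a t ih =>
    simp only [firstIdx] at h
    by_cases hp : p ≤ a
    · simp [hp] at h; simp [← h]
    · simp only [if_neg hp, Option.map_eq_some_iff] at h
      obtain ⟨k, hk, rfl⟩ := h
      have := ih hk
      simp [List.length_cons]; omega

theorem firstIdx_none_iff {hs : List Int} {p : Int} :
    firstIdx hs p = none ↔ ∀ x ∈ hs, x < p := by
  induction hs with
  | nil => simp [firstIdx]
  | cons a t ih =>
    simp only [firstIdx, List.mem_cons]
    by_cases hp : p ≤ a
    · simp only [if_pos hp]
      constructor
      · intro h; exact absurd h (by simp)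
      · intro h; exact absurd hp (by have := h a (Or.inl rfl); omega)
    · simp only [if_neg hp, Option.map_eq_none_iff, ih]
      constructor
      · intro h x hx
        rcases hx with rfl | hx
        · omega
        · exact h x hx
      · intro h x hx; exact h x (Or.inr hx)

theorem firstIdx_append (L R : List Int) (p : Int) :
    firstIdx (L ++ R) p =
      match firstIdx L p with
      | some j => some j
      | none => (firstIdx R p).map (· + L.length) := by
  induction L with
  | nil => cases h : firstIdx R p <;> simp [firstIdx, h]
  | cons a t ih =>
    simp only [List.cons_append, firstIdx, ih, List.length_cons]
    by_cases hp : p ≤ a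
    · simp [hp]
    · simp only [if_neg hp]
      cases ht : firstIdx t p with
      | some j => simp
      | none => cases firstIdx R p <;> simp <;> omega

-- ---- A-side ----

theorem innerA_gen (pre hs tail : List Int) (p : Int) :
    innerA (pre ++ hs ++ tail) p
        (PySem.List.pyRange (pre.length : Int) ((pre.length : Int) + (hs.length : Int)) 1)
      = some ((firstIdx hs p).map (fun k => ((pre.length + k : Nat) : Int))) := by
  induction hs generalizing pre with
  | nil => simp [firstIdx, PySem.List.pyRange, innerA]
  | cons h t ih =>
    have hassoc : pre ++ (h :: t) ++ tail = pre ++ h :: (t ++ tail) := by simp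
    rw [PySem.List.pyRange_one_cons (by simp only [List.length_cons]; push_cast; omega)]
    rw [hassoc]
    simp only [innerA, PySem.List.pyGet?_append_length pre (t ++ tail) h]
    by_cases hp : p ≤ h
    · simp [hp, firstIdx]
    · rw [if_neg hp]
      have h1 : (((pre ++ [h]).length : Nat) : Int) = (pre.length : Int) + 1 := by simp
      have h2 : (((pre ++ [h]).length : Nat) : Int) + (t.length : Int)
          = (pre.length : Int) + ((h :: t).length : Int) := by simp; omega
      have hlist : pre ++ h :: (t ++ tail) = (pre ++ [h]) ++ t ++ tail := by simp
      rw [hlist, ← h2, ← h1, ih (pre ++ [h])]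
      simp only [firstIdx, if_neg hp]
      cases firstIdx t p <;> simp [List.length_append] <;> omega

theorem innerA_spec (hs tail : List Int) (p : Int) :
    innerA (hs ++ tail) p (PySem.List.pyRange 0 (hs.length : Int) 1)
      = some ((firstIdx hs p).map (fun (k : Nat) => (k : Int))) := by
  have h := innerA_gen [] hs tail p
  simp only [List.nil_append, List.length_nil, Nat.cast_zero, zero_add] at h
  exact h

theorem set_append_left (L R : List Int) (j : Nat) (hj : j < L.length) (v : Int) :
    (L ++ R).set j v = L.set j v ++ R := by
  rw [List.set_append]
  simp [hj]

theorem loopA_spec (people : List Int) (ps : List Int) (i : Nat)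
    (hps : ps = people.drop i) (hi : i ≤ people.length) :
    ∀ (hs tail : List Int) (c : Int), hs.length = people.length →
    ∃ hs', loopA people (PySem.List.pyRange (i : Int) (people.length : Int) 1) (hs ++ tail, c)
      = some (hs', c + goRef ps hs) := by
  induction ps generalizing i with
  | nil =>
    intro hs tail c hlen
    have : i = people.length := by
      have := congrArg List.length hps; simp at this; omega
    subst this
    simp [PySem.List.pyRange, loopA, goRef]
  | cons p pt ih =>
    intro hs tail c hlen
    have hip : i < people.length := by
      have := congrArg List.length hps; simp at this; omega
    have hget : PySem.List.pyGet? people (i : Int) = some people[i] := by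
      rw [PySem.List.pyGet?_natCast]; simp [hip]
    have hp : p = people[i] := by
      have : people.drop i = people[i] :: people.drop (i+1) := List.drop_eq_getElem_cons hip
      rw [this] at hps; exact (List.cons.injEq .. ▸ hps).1
    rw [PySem.List.pyRange_one_cons (by omega)]
    simp only [loopA, hget]
    have hinner := innerA_spec hs tail people[i]
    rw [hlen] at hinner
    rw [hinner]
    have hpt : pt = people.drop (i + 1) := by
      have : people.drop i = people[i] :: people.drop (i+1) := List.drop_eq_getElem_cons hip
      rw [this] at hps; exact (List.cons.injEq .. ▸ hps).2
    cases hfi : firstIdx hs people[i] with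
    | none =>
      simp only [Option.map_none]
      have : ((i : Int) + 1) = ((i + 1 : Nat) : Int) := by push_cast; ring
      rw [this]
      obtain ⟨hs', hrec⟩ := ih (i+1) hpt (by omega) hs tail c hlen
      exact ⟨hs', by rw [hrec]; simp [goRef, hp, hfi]⟩
    | some j =>
      simp only [Option.map_some]
      have hjlt : j < hs.length := firstIdx_lt hfi
      have hset : PySem.List.pySetD (hs ++ tail) (j : Int) 0 = hs.set j 0 ++ tail := by
        rw [PySem.List.pySetD_natCast]
        exact set_append_left hs tail j hjlt 0
      rw [hset]
      have : ((i : Int) + 1) = ((i + 1 : Nat) : Int) := by push_cast; ring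
      rw [this]
      obtain ⟨hs', hrec⟩ := ih (i+1) hpt (by omega) (hs.set j 0) tail (c + 1) (by simp [hlen])
      refine ⟨hs', ?_⟩
      rw [hrec]
      simp [goRef, hp, hfi]; ring

theorem homeless_eq_ref (people houses : List Int)
    (hpre : people.length ≤ houses.length) :
    homeless people houses = (people.length : Int) - goRef people (houses.take people.length) := by
  unfold homeless
  have hsplit : houses = houses.take people.length ++ houses.drop people.length := by simp
  have hlen : (houses.take people.length).length = people.length := by simp [hpre]
  obtain ⟨hs', hrec⟩ := loopA_spec people people 0 (by simp) (by omega)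
    (houses.take people.length) (houses.drop people.length) 0 hlen
  simp only [Nat.cast_zero, zero_add] at hrec
  conv_lhs => rw [hsplit]
  rw [hrec]

-- ---- B-side ----

def segToList : SegT → List Int
  | .leaf v => [v]
  | .node _ _ l r => segToList l ++ segToList r

def segInv : SegT → Prop
  | .leaf _ => True
  | .node ls mx l r => ls = (segToList l).length ∧ mx = max (segTop l) (segTop r) ∧ segInv l ∧ segInv r

theorem le_segTop (t : SegT) (h : segInv t) : ∀ x ∈ segToList t, x ≤ segTop t := by
  induction t with
  | leaf v => simp [segTop, segToList]
  | node ls mx l r ihl ihr =>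
    obtain ⟨-, hmx, hil, hir⟩ := h
    intro x hx
    simp only [segToList, List.mem_append] at hx
    simp only [segTop, hmx]
    rcases hx with hx | hx
    · exact le_max_of_le_left (ihl hil x hx)
    · exact le_max_of_le_right (ihr hir x hx)

theorem segQuery_eq (t : SegT) (h : segInv t) (p : Int) :
    segQuery t p = firstIdx (segToList t) p := by
  induction t with
  | leaf v => by_cases hq : p ≤ v <;> simp [segQuery, segToList, firstIdx, hq]
  | node ls mx l r ihl ihr =>
    obtain ⟨hls, hmx, hil, hir⟩ := h
    simp only [segQuery, segToList]
    rw [firstIdx_append]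
    by_cases hlt : mx < p
    · simp only [hlt, if_true]
      have hnone : firstIdx (segToList l ++ segToList r) p = none := by
        rw [firstIdx_none_iff]
        intro x hx
        have := le_segTop (SegT.node ls mx l r) ⟨hls, hmx, hil, hir⟩ x (by simpa [segToList] using hx)
        simp only [segTop] at this; omega
      rw [firstIdx_append] at hnone
      cases hl : firstIdx (segToList l) p with
      | some j => rw [hl] at hnone; simp at hnone
      | none =>
        rw [hl] at hnone
        cases hr : firstIdx (segToList r) p with
        | some j => rw [hr] at hnone; simp at hnone
        | none => simp
    · simp only [hlt, if_false]
      rw [ihl hil, ihr hir]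
      cases hl : firstIdx (segToList l) p with
      | some j => simp
      | none =>
        cases hr : firstIdx (segToList r) p with
        | some j => simp [hls, Nat.add_comm]
        | none => simp

theorem segUpdate_spec (t : SegT) (h : segInv t) (j : Nat) (hj : j < (segToList t).length) :
    segToList (segUpdate t j) = (segToList t).set j 0 ∧ segInv (segUpdate t j) := by
  induction t generalizing j with
  | leaf v =>
    simp only [segToList, List.length_singleton, Nat.lt_one_iff] at hj
    subst hj
    simp [segUpdate, segToList, segInv]
  | node ls mx l r ihl ihr =>
    obtain ⟨hls, hmx, hil, hir⟩ := h
    simp only [segToList, List.length_append] at hj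
    simp only [segUpdate]
    by_cases hcase : j < ls
    · simp only [hcase, if_true]
      obtain ⟨h1, h2⟩ := ihl hil j (by omega)
      refine ⟨?_, ?_⟩
      · simp only [segToList, h1]
        rw [set_append_left _ _ _ (by omega)]
      · exact ⟨by simp [h1, hls], rfl, h2, hir⟩
    · simp only [hcase, if_false]
      obtain ⟨h1, h2⟩ := ihr hir (j - ls) (by omega)
      refine ⟨?_, ?_⟩
      · simp only [segToList, h1]
        rw [List.set_append]
        simp [hls] at hcase ⊢
        intro hcon; omega
      · exact ⟨hls, rfl, hil, h2⟩

theorem segBuild_spec (hs : List Int) (hne : hs ≠ []) :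
    segToList (segBuild hs) = hs ∧ segInv (segBuild hs) := by
  induction hs using segBuild.induct with
  | case1 => simp at hne
  | case2 x => simp [segBuild, segToList, segInv]
  | case3 x y rest m ihl ihr =>
    have hL : (x :: y :: rest).length = rest.length + 2 := by simp
    have hm1 : 1 ≤ (x :: y :: rest).length / 2 := by omega
    have hmlt : (x :: y :: rest).length / 2 < (x :: y :: rest).length := by omega
    have htake : (x :: y :: rest).take ((x :: y :: rest).length / 2) ≠ [] := by
      intro hcon
      have := congrArg List.length hcon
      simp only [List.length_take, List.length_nil] at this
      omega
    have hdrop : (x :: y :: rest).drop ((x :: y :: rest).length / 2) ≠ [] := by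
      intro hcon
      have := congrArg List.length hcon
      simp only [List.length_drop, List.length_nil] at this
      omega
    obtain ⟨hl1, hl2⟩ := ihl htake
    obtain ⟨hr1, hr2⟩ := ihr hdrop
    rw [segBuild]
    refine ⟨?_, ?_⟩
    · simp only [segToList]
      rw [hl1, hr1]
      simp
    · refine ⟨?_, rfl, hl2, hr2⟩
      rw [hl1]
      simp only [List.length_take]
      omega

theorem foldB_spec (ps : List Int) (t : SegT) (c : Int) (h : segInv t) :
    (ps.foldl
      (fun (st : SegT × Int) p =>
        match segQuery st.1 p with
        | some j => (segUpdate st.1 j, st.2 + 1)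
        | none => st)
      (t, c)).2 = c + goRef ps (segToList t) := by
  induction ps generalizing t c with
  | nil => simp [goRef]
  | cons p pt ih =>
    simp only [List.foldl_cons, goRef]
    rw [segQuery_eq t h p]
    cases hfi : firstIdx (segToList t) p with
    | none => simp only [hfi]; exact ih t c h
    | some j =>
      simp only [hfi]
      obtain ⟨h1, h2⟩ := segUpdate_spec t h j (firstIdx_lt hfi)
      rw [ih _ _ h2, h1]
      ring

theorem goRef_nil : ∀ ps : List Int, goRef ps [] = 0 := by
  intro ps; induction ps with
  | nil => rfl
  | cons p pt ih => simp [goRef, firstIdx, ih]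

theorem homeless_alt_eq_ref (people houses : List Int) :
    homeless_alt people houses = (people.length : Int) - goRef people (houses.take people.length) := by
  unfold homeless_alt
  simp only [PySem.List.slice_to_natCast]
  by_cases hnil : houses.take people.length = []
  · simp [hnil, goRef_nil]
  · simp only [if_neg hnil]
    obtain ⟨h1, h2⟩ := segBuild_spec _ hnil
    rw [foldB_spec _ _ _ h2, h1]
    ring

-- ===== VERDICT (by name: the statement is the Claim_ definition above) =====
theorem homeless_spec : Claim_equal_homeless := by
  intro people houses _ hpre
  unfold Spec_homeless
  rw [homeless_eq_ref people houses hpre, homeless_alt_eq_ref]
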